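-- pv_equiv track=rewrite | github.com/tchin8/practice-problems | codewars.py | namelist
-- ===== SOURCE A (Python) =====
-- def namelist(names):
--     str = ''
--     if len(names) == 0:
--         return str
--     for i in range(len(names)):
--         n = names[i]['name']
--         if i == len(names) - 1:
--             str += '& '
--         elif i != 0:
--             str += ', '
--         str += n
--     return str
-- ===== SOURCE B (Python) =====
-- def namelist(names):
--     parts = [n['name'] for n in names]
--     if not parts:
--         return ''
--     return ', '.join(parts[:-1]) + '& ' + parts[-1]
-- ===== Notes on version B (the rewrite author's own statement) =====
-- stated objective: simpler
-- what changed: Replaces the index loop with three per-index separator branches by extracting the name strings once and composing 'comma-join of all but last' + '& ' + last.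
-- outside the precondition, e.g. on namelist([{}]): A raises KeyError, B raises KeyError
import Mathlib
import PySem

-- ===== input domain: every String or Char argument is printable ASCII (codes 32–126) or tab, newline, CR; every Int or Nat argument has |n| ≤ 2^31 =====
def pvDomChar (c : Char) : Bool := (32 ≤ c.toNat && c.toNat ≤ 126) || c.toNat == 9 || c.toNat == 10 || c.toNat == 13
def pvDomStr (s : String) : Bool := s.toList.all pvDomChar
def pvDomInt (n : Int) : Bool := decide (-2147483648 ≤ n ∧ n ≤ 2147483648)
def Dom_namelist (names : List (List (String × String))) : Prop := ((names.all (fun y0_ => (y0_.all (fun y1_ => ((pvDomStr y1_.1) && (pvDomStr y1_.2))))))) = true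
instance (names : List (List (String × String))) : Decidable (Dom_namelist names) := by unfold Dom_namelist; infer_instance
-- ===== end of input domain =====

-- B replaces A's per-index three-branch separator choice by "comma-join of all but last" + "& " + last (objective: simpler).

-- n['name'] : first-match association-list lookup (Python dict access), "" outside Pre_ (where Python raises KeyError)
def getName (d : List (String × String)) : String := (List.lookup "name" d).getD ""

-- ===== PORT A =====
def namelist (names : List (List (String × String))) : String :=
  if names.length = 0 then ""
  else
    (List.range names.length).foldl (fun s i =>
      let n := getName (names.getD i [])   -- names[i]['name']; i ∈ range(len(names)) is always in range
      let s := if i = names.length - 1 then s ++ "& "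
               else if i ≠ 0 then s ++ ", " else s
      s ++ n) ""

-- ===== PORT B =====
-- port of ', '.join
def joinComma : List String → String
  | [] => ""
  | [a] => a
  | a :: b :: r => a ++ ", " ++ joinComma (b :: r)

def namelist_alt (names : List (List (String × String))) : String :=
  let parts := names.map getName
  if parts = [] then ""
  else joinComma parts.dropLast ++ "& " ++ (parts.getLast?.getD "")

-- ===== PRECONDITION & SPEC =====
-- Pre_ excludes exactly the inputs where some dict lacks the key 'name': there Python A (and B) raise KeyError.
def Pre_namelist (names : List (List (String × String))) : Prop :=
  ∀ d ∈ names, (List.lookup "name" d).isSome = true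
instance (names : List (List (String × String))) : Decidable (Pre_namelist names) := by unfold Pre_namelist; infer_instance

def pvWitness_namelist : (List (List (String × String))) := [[("name", "Bart")], [("name", "Lisa")]]

def Spec_namelist (names : List (List (String × String))) (out : String) : Prop := out = namelist_alt names
instance (names : List (List (String × String))) (out : String) : Decidable (Spec_namelist names out) := by unfold Spec_namelist; infer_instance

-- ===== CLAIM (what is proved, stated in full; the proofs are below) =====
def Claim_equal_namelist : Prop := ∀ (names : List (List (String × String))), Dom_namelist names → Pre_namelist names → Spec_namelist names (namelist names)

-- ===== LEMMAS AND PROOFS =====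

theorem joinComma_concat (l : List String) (a : String) :
    joinComma (l ++ [a]) = if l = [] then a else joinComma l ++ ", " ++ a := by
  induction l with
  | nil => simp [joinComma]
  | cons x xs ih =>
    cases xs with
    | nil => simp [joinComma]
    | cons y ys =>
      simp only [List.cons_append, joinComma] at ih ⊢
      rw [ih]
      simp [String.append_assoc]

-- A's loop body, abstracted over the list of extracted name strings
def stepA (ps : List String) (s : String) (i : Nat) : String :=
  let n := ps.getD i ""
  let s := if i = ps.length - 1 then s ++ "& "
           else if i ≠ 0 then s ++ ", " else s
  s ++ n

theorem foldl_stepA_take (ps : List String) (m : Nat) (h : m + 1 ≤ ps.length) :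
    (List.range m).foldl (stepA ps) "" = joinComma (ps.take m) := by
  induction m with
  | zero => simp [joinComma]
  | succ k ih =>
    have hklt : k < ps.length := by omega
    have hne : k ≠ ps.length - 1 := by omega
    rw [List.range_succ, List.foldl_append, ih (by omega)]
    have htake : ps.take (k + 1) = ps.take k ++ [ps[k]] := by
      rw [List.take_add_one]
      simp [List.getElem?_eq_getElem hklt]
    rw [htake, joinComma_concat]
    simp only [List.foldl_cons, List.foldl_nil, stepA, if_neg hne]
    by_cases hk0 : k = 0
    · subst hk0
      simp [joinComma, List.getD, List.getElem?_eq_getElem hklt]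
    · have hne2 : ps.take k ≠ [] := by
        intro hemp
        rcases List.take_eq_nil_iff.mp hemp with h0 | h0
        · exact hk0 h0
        · rw [h0] at hklt
          simp at hklt
      simp [hk0, hne2, List.getD, List.getElem?_eq_getElem hklt]

theorem foldlA_eq (ns : List (List (String × String))) (h : ns ≠ []) :
    (List.range ns.length).foldl (fun s i =>
      (if i = ns.length - 1 then s ++ "& " else if i ≠ 0 then s ++ ", " else s)
        ++ getName (ns.getD i [])) ""
    = joinComma (ns.map getName).dropLast ++ "& " ++ ((ns.map getName).getLast?.getD "") := by
  set ps : List String := ns.map getName with hps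
  have hplen : ps.length = ns.length := by simp [hps]
  have hfold :
      (List.range ns.length).foldl (fun s i =>
        (if i = ns.length - 1 then s ++ "& " else if i ≠ 0 then s ++ ", " else s)
          ++ getName (ns.getD i [])) ""
      = (List.range ns.length).foldl (stepA ps) "" := by
    have hfun : (fun (s : String) (i : Nat) =>
        (if i = ns.length - 1 then s ++ "& " else if i ≠ 0 then s ++ ", " else s)
          ++ getName (ns.getD i [])) = stepA ps := by
      funext s i
      have hget : ps.getD i "" = getName (ns.getD i []) := by
        by_cases hi : i < ns.length
        · simp [hps, List.getD, hi]
        · have h1 : ns.length ≤ i := Nat.le_of_not_lt hi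
          have h2 : ps.length ≤ i := by omega
          simp [List.getD, List.getElem?_eq_none h1, List.getElem?_eq_none h2, getName]
      simp only [stepA, hplen]
      rw [hget]
    rw [hfun]
  rw [hfold]
  have hpos : 1 ≤ ns.length := List.length_pos_iff.mpr h
  obtain ⟨k, hk⟩ : ∃ k, ns.length = k + 1 := ⟨ns.length - 1, by omega⟩
  rw [hk, List.range_succ, List.foldl_append, foldl_stepA_take ps k (by omega)]
  simp only [List.foldl_cons, List.foldl_nil, stepA]
  have hlast : k = ps.length - 1 := by omega
  rw [if_pos hlast]
  have hklt : k < ps.length := by omega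
  have hgd : ps.getD k "" = ps[k] := by simp [List.getD, List.getElem?_eq_getElem hklt]
  have hdrop : ps.dropLast = ps.take k := by
    rw [List.dropLast_eq_take]
    congr 1
    omega
  have hgl : ps.getLast?.getD "" = ps[k] := by
    rw [List.getLast?_eq_getElem?]
    simp [hplen, hk]
  rw [hgd, hdrop, hgl]

theorem namelist_eq_alt (names : List (List (String × String))) :
    namelist names = namelist_alt names := by
  unfold namelist namelist_alt
  by_cases h : names = []
  · subst h
    simp
  · have hlen : ¬ names.length = 0 := by simpa using h
    have hmap : ¬ names.map getName = [] := by simpa using h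
    rw [if_neg hlen]
    simp only [if_neg hmap]
    exact foldlA_eq names h

-- ===== VERDICT (by name: the statement is the Claim_ definition above) =====
theorem namelist_spec : Claim_equal_namelist := by
  intro names _ _
  exact namelist_eq_alt names
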